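-- pv_equiv track=rewrite | github.com/DarKoul-Wmg/AMS-AWS-1 | MP03 Programación/UF2_Python dineño modular/Clase/Ejercicio_discord_recu/ex7recu.py | lista_vocales
-- ===== SOURCE A (Python) =====
-- def lista_vocales(cadena):
--     lista = []
--     vocales = "aeiou"
--
--     if len(cadena) == 0:
--         return lista
--
--     elif cadena[0] in vocales:
--         lista.append(cadena[0])
--         return lista + lista_vocales(cadena[1:])
--
--     return lista + lista_vocales(cadena[1:])
-- ===== SOURCE B (Python) =====
-- def lista_vocales(cadena):
--     return [c for c in cadena if c in "aeiou"]
-- ===== Notes on version B (the rewrite author's own statement) =====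
-- stated objective: simpler
-- what changed: Replaced A's recursion on the tail (cadena[1:] slicing plus list concatenation at each step) by a single-pass filtering list comprehension.
import Mathlib
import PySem

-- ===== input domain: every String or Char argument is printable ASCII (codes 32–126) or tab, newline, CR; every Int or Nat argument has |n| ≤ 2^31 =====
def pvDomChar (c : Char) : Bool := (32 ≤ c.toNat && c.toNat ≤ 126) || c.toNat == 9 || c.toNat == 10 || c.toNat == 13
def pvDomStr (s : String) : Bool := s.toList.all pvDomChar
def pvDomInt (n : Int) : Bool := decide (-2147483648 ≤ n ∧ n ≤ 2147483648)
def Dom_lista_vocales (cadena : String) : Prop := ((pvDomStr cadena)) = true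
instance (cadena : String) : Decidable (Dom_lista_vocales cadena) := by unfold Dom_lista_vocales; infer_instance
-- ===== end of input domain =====

-- B replaces A's recursion-with-concatenation by a single filtering pass (simpler decomposition).


-- ===== PORT A =====
-- A's recursion: empty → [], vowel head → [head] ++ recurse on tail, else [] ++ recurse on tail.
def lista_vocales_rec (cs : List Char) : List String :=
  match cs with
  | [] => []
  | c :: rest =>
    if ("aeiou".toList.contains c) then
      [String.mk [c]] ++ lista_vocales_rec rest
    else
      [] ++ lista_vocales_rec rest

def lista_vocales (cadena : String) : List String := lista_vocales_rec cadena.toList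

-- ===== PORT B =====
-- Source B: [c for c in cadena if c in "aeiou"]
def lista_vocales_alt (cadena : String) : List String :=
  (cadena.toList.filter (fun c => "aeiou".toList.contains c)).map (fun c => String.mk [c])

-- ===== PRECONDITION & SPEC =====
def Spec_lista_vocales (cadena : String) (out : List String) : Prop := out = lista_vocales_alt cadena
instance (cadena : String) (out : List String) : Decidable (Spec_lista_vocales cadena out) := by unfold Spec_lista_vocales; infer_instance

-- ===== CLAIM (what is proved, stated in full; the proofs are below) =====
def Claim_equal_lista_vocales : Prop := ∀ (cadena : String), Dom_lista_vocales cadena → Spec_lista_vocales cadena (lista_vocales cadena)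

-- ===== LEMMAS AND PROOFS =====
theorem lista_vocales_rec_eq (cs : List Char) :
    lista_vocales_rec cs
      = (cs.filter (fun c => "aeiou".toList.contains c)).map (fun c => String.mk [c]) := by
  induction cs with
  | nil => rfl
  | cons c rest ih =>
    simp only [lista_vocales_rec, List.filter_cons]
    split_ifs with h <;> simp [h, ih]

-- ===== VERDICT (by name: the statement is the Claim_ definition above) =====
theorem lista_vocales_spec : Claim_equal_lista_vocales := by
  intro cadena _
  unfold Spec_lista_vocales lista_vocales lista_vocales_alt
  exact lista_vocales_rec_eq cadena.toList
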